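-- pv_equiv track=rewrite | github.com/tspeke/tspeke.github.io | practice-pages/python/matrix_shift.py | shift_matrix
-- ===== SOURCE A (Python) =====
-- def shift_matrix(M_input, shift):
--
--     height = len(M_input)
--     width = len(M_input[0])
--     size = width * height
--
--     M_shifted = [[0]*width for _ in range(height)]
--
--     for j in range(height):
--         for i in range(width):
--             # "Flatten" the matrix into single index parameter
--             index = j*width + i
--             shifted_index = (index + shift) % size
--             shifted_i = shifted_index % width
--             shifted_j = shifted_index // width
--             M_shifted[shifted_j][shifted_i] = M_input[j][i]
--
--     return M_shifted
-- ===== SOURCE B (Python) =====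
-- def shift_matrix(M_input, shift):
--     height = len(M_input)
--     width = len(M_input[0])
--     size = width * height
--     flat = [x for row in M_input for x in row[:width]]
--     out = [flat[(m - shift) % size] for m in range(size)]
--     return [out[j*width:(j+1)*width] for j in range(height)]
-- ===== Notes on version B (the rewrite author's own statement) =====
-- stated objective: simpler
-- what changed: Replaces A's per-element scatter (computing a destination row/column for every source cell and writing into a preallocated matrix) by flatten / gather-rotate with the inverse index / reshape-by-slicing.
import Mathlib
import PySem

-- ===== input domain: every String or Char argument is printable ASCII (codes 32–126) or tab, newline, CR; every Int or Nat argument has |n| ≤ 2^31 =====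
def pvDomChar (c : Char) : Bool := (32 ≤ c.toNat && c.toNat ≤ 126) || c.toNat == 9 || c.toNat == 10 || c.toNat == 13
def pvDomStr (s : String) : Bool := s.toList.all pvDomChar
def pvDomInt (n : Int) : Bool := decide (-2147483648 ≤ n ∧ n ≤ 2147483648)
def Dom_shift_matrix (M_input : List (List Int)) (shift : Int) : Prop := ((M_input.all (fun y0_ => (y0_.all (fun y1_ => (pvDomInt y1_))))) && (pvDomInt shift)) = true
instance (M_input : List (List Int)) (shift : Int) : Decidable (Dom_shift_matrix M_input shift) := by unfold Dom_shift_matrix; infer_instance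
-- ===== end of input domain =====

-- B replaces A's per-element scatter (a destination row/column computed for every source cell,
-- written into a preallocated zero matrix) by flatten / gather with the inverse index / reshape
-- by slicing; objective: simpler.

-- ===== PORT A =====
-- literal transliteration of A: nested loops over j, i scattering M_input[j][i]
-- to the shifted flat position of a preallocated zero matrix.
def shift_matrix (M_input : List (List Int)) (shift : Int) : List (List Int) :=
  let height : Int := (M_input.length : Int)
  let width : Int := (((PySem.List.pyGet? M_input 0).getD []).length : Int)
  let size : Int := width * height
  let M0 : List (List Int) :=
    (PySem.List.pyRange 0 height 1).map (fun _ =>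
      (PySem.List.pyRange 0 width 1).map (fun _ => (0 : Int)))
  (PySem.List.pyRange 0 height 1).foldl (fun Ms j =>
    (PySem.List.pyRange 0 width 1).foldl (fun Ms i =>
      let index := j * width + i
      let shifted_index := PySem.Int.mod (index + shift) size
      let shifted_i := PySem.Int.mod shifted_index width
      let shifted_j := PySem.Int.floordiv shifted_index width
      PySem.List.pySetD Ms shifted_j
        (PySem.List.pySetD (PySem.List.pyGetD Ms shifted_j []) shifted_i
          (PySem.List.pyGetD (PySem.List.pyGetD M_input j []) i 0))) Ms) M0

-- ===== PORT B =====
-- literal transliteration of B: flatten (first `width` entries of each row),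
-- gather-rotate with the inverse index, reshape by slicing.
def shift_matrix_alt (M_input : List (List Int)) (shift : Int) : List (List Int) :=
  let height : Int := (M_input.length : Int)
  let width : Int := (((PySem.List.pyGet? M_input 0).getD []).length : Int)
  let size : Int := width * height
  let flat : List Int := M_input.flatMap (fun row => PySem.List.slice row none (some width))
  let out : List Int := (PySem.List.pyRange 0 size 1).map (fun m =>
      PySem.List.pyGetD flat (PySem.Int.mod (m - shift) size) 0)
  (PySem.List.pyRange 0 height 1).map (fun j =>
      PySem.List.slice out (some (j * width)) (some ((j + 1) * width)))

-- ===== PRECONDITION & SPEC =====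
-- Pre_ is exactly the no-exception domain of A: a nonempty matrix whose every row has at
-- least as many entries as the first row (otherwise A raises IndexError; B raises there too).
def Pre_shift_matrix (M_input : List (List Int)) (shift : Int) : Prop :=
  M_input ≠ [] ∧ ∀ row ∈ M_input, (M_input.headD []).length ≤ row.length

instance (M_input : List (List Int)) (shift : Int) : Decidable (Pre_shift_matrix M_input shift) := by
  unfold Pre_shift_matrix; infer_instance

def pvWitness_shift_matrix : List (List Int) × Int := ([[1, 2], [3, 4]], 1)

def Spec_shift_matrix (M_input : List (List Int)) (shift : Int) (out : List (List Int)) : Prop := out = shift_matrix_alt M_input shift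
instance (M_input : List (List Int)) (shift : Int) (out : List (List Int)) : Decidable (Spec_shift_matrix M_input shift out) := by unfold Spec_shift_matrix; infer_instance

-- ===== CLAIM (what is proved, stated in full; the proofs are below) =====
def Claim_equal_shift_matrix : Prop := ∀ (M_input : List (List Int)) (shift : Int), Dom_shift_matrix M_input shift → Pre_shift_matrix M_input shift → Spec_shift_matrix M_input shift (shift_matrix M_input shift)

-- ===== LEMMAS AND PROOFS =====

-- flat cell read: the (t / w, t % w) entry of the matrix state, with defaults
def pvCell (S : List (List Int)) (w t : Nat) : Int := (S.getD (t / w) []).getD (t % w) 0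

-- proof-side copy of A's loop body, with the flat source index d already formed
def pvFlatBody (flat : List Int) (w n : Nat) (shift : Int)
    (S : List (List Int)) (d : Int) : List (List Int) :=
  let p := PySem.Int.mod (d + shift) (n : Int)
  PySem.List.pySetD S (PySem.Int.floordiv p (w : Int))
    (PySem.List.pySetD (PySem.List.pyGetD S (PySem.Int.floordiv p (w : Int)) [])
      (PySem.Int.mod p (w : Int))
      (PySem.List.pyGetD flat d 0))

theorem pv_bij (n s t k : Int) (hn : 0 < n) (ht0 : 0 ≤ t) (ht : t < n)
    (hk0 : 0 ≤ k) (hk : k < n) : (t - s) % n = k ↔ (k + s) % n = t := by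
  constructor
  · intro h
    rw [← h]
    show ((t - s) % n + s) % n = t
    rw [Int.emod_add_emod, sub_add_cancel, Int.emod_eq_of_lt ht0 ht]
  · intro h
    rw [← h]
    show ((k + s) % n - s) % n = k
    rw [Int.emod_sub_emod, add_sub_cancel_right, Int.emod_eq_of_lt hk0 hk]

theorem pv_flat_get (w : Nat) (M : List (List Int))
    (hr : ∀ row ∈ M, w ≤ row.length) (j i : Nat) (hj : j < M.length) (hi : i < w) :
    PySem.List.pyGetD (PySem.List.pyGetD M (j : Int) []) (i : Int) 0
      = PySem.List.pyGetD (M.flatMap (fun row => PySem.List.slice row none (some (w : Int)))) ((j * w + i : Nat) : Int) 0 := by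
  induction M generalizing j with
  | nil => simp at hj
  | cons r rs ih =>
    have hw : w ≤ r.length := hr r (by simp)
    simp only [List.flatMap_cons, PySem.List.slice_to_natCast, PySem.List.pyGetD_natCast]
    have hmin : (r.take w).length = w := by simp; omega
    cases j with
    | zero =>
      simp only [Nat.zero_mul, Nat.zero_add, List.getD_cons_zero]
      have h1 : i < (r.take w).length := by omega
      rw [List.getD, List.getD, List.getElem?_append_left h1]
      simp [hi]
    | succ j' =>
      have hj' : j' < rs.length := by simpa using hj
      have hsm : (j' + 1) * w = j' * w + w := Nat.succ_mul j' w
      have := ih (fun row hrow => hr row (by simp [hrow])) j' hj'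
      simp only [PySem.List.pyGetD_natCast, PySem.List.slice_to_natCast] at this
      rw [List.getD_cons_succ, this, List.getD, List.getD,
        List.getElem?_append_right (by omega)]
      have hidx : (j' + 1) * w + i - (List.take w r).length = j' * w + i := by
        rw [hmin, hsm]; omega
      rw [hidx]

theorem pv_getD_set_self {x : List Int} (S : List (List Int)) (a : Nat) (h : a < S.length) :
    (S.set a x).getD a [] = x := by
  rw [List.getD, List.getElem?_set_self (by omega), Option.getD_some]

theorem pv_getD_set_ne {x : List Int} (S : List (List Int)) (a b : Nat) (h : a ≠ b) :
    (S.set a x).getD b [] = S.getD b [] := by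
  rw [List.getD, List.getElem?_set_ne h, List.getD]

theorem pv_body_eq (flat : List Int) (w n : Nat) (shift : Int) (S : List (List Int)) (k : Nat)
    (hw : 0 < w) (hn : 0 < n) :
    pvFlatBody flat w n shift S (k : Int)
      = S.set (((((k : Int) + shift) % (n : Int)).toNat) / w)
          ((S.getD (((((k : Int) + shift) % (n : Int)).toNat) / w) []).set
            (((((k : Int) + shift) % (n : Int)).toNat) % w) (flat.getD k 0)) := by
  have hn' : (0 : Int) < (n : Int) := by exact_mod_cast hn
  have hw' : (0 : Int) < (w : Int) := by exact_mod_cast hw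
  simp only [pvFlatBody]
  rw [PySem.Int.mod_eq_emod_of_pos hn']
  set p : Int := ((k : Int) + shift) % (n : Int) with hp
  have hp0 : 0 ≤ p := Int.emod_nonneg _ (by omega)
  have hpq : p = ((p.toNat : Nat) : Int) := (Int.toNat_of_nonneg hp0).symm
  rw [PySem.Int.floordiv_eq_ediv_of_pos hw', PySem.Int.mod_eq_emod_of_pos hw']
  rw [hpq, ← Int.natCast_ediv, ← Int.natCast_emod]
  simp only [PySem.List.pySetD_natCast, PySem.List.pyGetD_natCast]
  rfl

theorem pv_cell_set (w h : Nat) (S : List (List Int)) (hS : S.length = h)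
    (hrows : ∀ j < h, (S.getD j []).length = w) (q t : Nat) (hw : 0 < w)
    (hq : q < w * h) (ht : t < w * h) (v : Int) :
    pvCell (S.set (q / w) ((S.getD (q / w) []).set (q % w) v)) w t
      = if t = q then v else pvCell S w t := by
  have hqh : q / w < h := Nat.div_lt_of_lt_mul hq
  have hth : t / w < h := Nat.div_lt_of_lt_mul ht
  have hqm : q % w < w := Nat.mod_lt _ hw
  have htm : t % w < w := Nat.mod_lt _ hw
  have hrl : (S.getD (q / w) []).length = w := hrows _ hqh
  unfold pvCell
  by_cases hrow : t / w = q / w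
  · rw [hrow, pv_getD_set_self S _ (by omega)]
    by_cases heq : t = q
    · subst heq
      rw [List.getD, List.getElem?_set_self (by omega), Option.getD_some, if_pos rfl]
    · have hmm : q % w ≠ t % w := by
        intro hc
        apply heq
        have h1 := Nat.div_add_mod t w
        have h2 := Nat.div_add_mod q w
        rw [hrow, ← hc] at h1
        omega
      rw [List.getD, List.getElem?_set_ne hmm, ← List.getD, if_neg heq]
  · rw [pv_getD_set_ne S _ _ (fun hc => hrow hc.symm),
      if_neg (fun hc => hrow (by rw [hc]))]

def pvScat (flat : List Int) (w h : Nat) (shift : Int) (k : Nat) : List (List Int) :=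
  (List.range k).foldl (fun S (d : Nat) => pvFlatBody flat w (w * h) shift S ((d : Nat) : Int))
    (List.replicate h (List.replicate w (0 : Int)))

theorem pvScat_succ (flat : List Int) (w h : Nat) (shift : Int) (k : Nat) :
    pvScat flat w h shift (k + 1) = pvFlatBody flat w (w * h) shift (pvScat flat w h shift k) (k : Int) := by
  unfold pvScat
  rw [List.range_succ, List.foldl_append, List.foldl_cons, List.foldl_nil]

theorem pv_scatter (w h : Nat) (hw : 0 < w) (hh : 0 < h) (shift : Int) (flat : List Int)
    (k : Nat) (hk : k ≤ w * h) :
    (pvScat flat w h shift k).length = h ∧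
    (∀ j < h, ((pvScat flat w h shift k).getD j []).length = w) ∧
    (∀ t < w * h, pvCell (pvScat flat w h shift k) w t =
        if ((t : Int) - shift) % ((w * h : Nat) : Int) < (k : Int)
        then PySem.List.pyGetD flat (PySem.Int.mod ((t : Int) - shift) ((w * h : Nat) : Int)) 0
        else 0) := by
  have hn : 0 < w * h := Nat.mul_pos hw hh
  have hn' : (0 : Int) < ((w * h : Nat) : Int) := by exact_mod_cast hn
  induction k with
  | zero =>
    refine ⟨by simp [pvScat], fun j hj => by simp [pvScat, List.getD, List.getElem?_replicate, hj],
      fun t ht => ?_⟩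
    have he0 : 0 ≤ ((t : Int) - shift) % ((w * h : Nat) : Int) := Int.emod_nonneg _ (by omega)
    rw [if_neg (by omega)]
    have htw : t / w < h := Nat.div_lt_of_lt_mul ht
    simp [pvScat, pvCell, List.getD, List.getElem?_replicate, htw, Nat.mod_lt t hw]
  | succ k ih =>
    obtain ⟨hlen, hrows, hcell⟩ := ih (by omega)
    have hq' : 0 ≤ ((k : Int) + shift) % ((w * h : Nat) : Int) := Int.emod_nonneg _ (by omega)
    have hqlt : ((k : Int) + shift) % ((w * h : Nat) : Int) < ((w * h : Nat) : Int) :=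
      Int.emod_lt_of_pos _ hn'
    rw [pvScat_succ, pv_body_eq flat w (w * h) shift _ k hw hn]
    set q : Nat := (((k : Int) + shift) % ((w * h : Nat) : Int)).toNat with hqdef
    have hqc : ((q : Nat) : Int) = ((k : Int) + shift) % ((w * h : Nat) : Int) :=
      Int.toNat_of_nonneg hq'
    have hqn : q < w * h := by omega
    refine ⟨by simp [hlen], fun j hj => ?_, fun t ht => ?_⟩
    · by_cases hj' : j = q / w
      · subst hj'
        rw [pv_getD_set_self _ _ (by omega), List.length_set]
        exact hrows _ hj
      · rw [pv_getD_set_ne _ _ _ (fun hc => hj' hc.symm)]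
        exact hrows _ hj
    · rw [pv_cell_set w h _ hlen hrows q t hw hqn ht]
      have ht' : ((t : Int)) < ((w * h : Nat) : Int) := by exact_mod_cast ht
      have hbij := pv_bij ((w * h : Nat) : Int) shift (t : Int) (k : Int) hn'
        (by omega) ht' (by omega) (by omega)
      set e : Int := ((t : Int) - shift) % ((w * h : Nat) : Int) with hedef
      have he0 : 0 ≤ e := Int.emod_nonneg _ (by omega)
      have helt : e < ((w * h : Nat) : Int) := Int.emod_lt_of_pos _ hn'
      by_cases heq : t = q
      · rw [if_pos heq]
        have htq : ((k : Int) + shift) % ((w * h : Nat) : Int) = (t : Int) := by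
          rw [← hqc, heq]
        have hek : e = (k : Int) := hbij.mpr htq
        rw [if_pos (by omega)]
        rw [PySem.Int.mod_eq_emod_of_pos hn', ← hedef, hek, PySem.List.pyGetD_natCast]
      · rw [if_neg heq]
        have hek : e ≠ (k : Int) := by
          intro hc
          apply heq
          have := hbij.mp hc
          omega
        rw [hcell t ht]
        by_cases hlt : e < (k : Int)
        · rw [if_pos hlt, if_pos (by omega)]
        · rw [if_neg hlt, if_neg (by omega)]

theorem pv_nest (f : List (List Int) → Nat → List (List Int)) (w : Nat) :
    ∀ (h' : Nat) (init : List (List Int)),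
      (List.range h').foldl (fun S j => (List.range w).foldl (fun S i => f S (j * w + i)) S) init
        = (List.range (h' * w)).foldl f init := by
  intro h'
  induction h' with
  | zero => simp
  | succ m ih =>
    intro init
    rw [List.range_succ, List.foldl_append, ih, Nat.succ_mul, List.range_add,
      List.foldl_append, List.foldl_map]
    simp

theorem pv_portA_eq (M : List (List Int)) (w h : Nat) (shift : Int) (flat : List Int)
    (hw : 0 < w)
    (hget : ∀ j i : Nat, j < h → i < w →
      PySem.List.pyGetD (PySem.List.pyGetD M (j : Int) []) (i : Int) 0
        = PySem.List.pyGetD flat ((j * w + i : Nat) : Int) 0) :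
    List.foldl
      (fun Ms j =>
        List.foldl
          (fun Ms i =>
            PySem.List.pySetD Ms
              (PySem.Int.floordiv (PySem.Int.mod (j * (w : Int) + i + shift) ((w : Int) * (h : Int))) (w : Int))
              (PySem.List.pySetD
                (PySem.List.pyGetD Ms
                  (PySem.Int.floordiv (PySem.Int.mod (j * (w : Int) + i + shift) ((w : Int) * (h : Int))) (w : Int))
                  [])
                (PySem.Int.mod (PySem.Int.mod (j * (w : Int) + i + shift) ((w : Int) * (h : Int))) (w : Int))
                (PySem.List.pyGetD (PySem.List.pyGetD M j []) i 0)))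
          Ms (PySem.List.pyRange 0 (w : Int) 1))
      (List.map (fun _ => List.map (fun _ => (0 : Int)) (PySem.List.pyRange 0 (w : Int) 1))
        (PySem.List.pyRange 0 (h : Int) 1))
      (PySem.List.pyRange 0 (h : Int) 1)
    = pvScat flat w h shift (w * h) := by
  rw [PySem.List.pyRange_zero_natCast h, PySem.List.pyRange_zero_natCast w]
  rw [List.map_map, List.map_map]
  have hinit : (List.range h).map ((fun _ => (List.range w).map ((fun _ => (0:Int)) ∘ (Nat.cast : Nat → Int))) ∘ (Nat.cast : Nat → Int))
      = List.replicate h (List.replicate w (0 : Int)) := by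
    rw [show ((fun _ => (List.range w).map ((fun _ => (0:Int)) ∘ (Nat.cast : Nat → Int))) ∘ (Nat.cast : Nat → Int))
        = (fun (_ : Nat) => (List.range w).map ((fun _ => (0:Int)) ∘ (Nat.cast : Nat → Int))) from rfl]
    rw [show ((fun _ => (0:Int)) ∘ (Nat.cast : Nat → Int)) = (fun (_ : Nat) => (0:Int)) from rfl]
    rw [List.map_const', List.map_const', List.length_range, List.length_range]
  rw [hinit, List.foldl_map]
  have hinner : ∀ (S : List (List Int)) (j : Nat), j < h →
      List.foldl
        (fun Ms i =>
          PySem.List.pySetD Ms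
            (PySem.Int.floordiv (PySem.Int.mod ((j : Int) * (w : Int) + i + shift) ((w : Int) * (h : Int))) (w : Int))
            (PySem.List.pySetD
              (PySem.List.pyGetD Ms
                (PySem.Int.floordiv (PySem.Int.mod ((j : Int) * (w : Int) + i + shift) ((w : Int) * (h : Int))) (w : Int))
                [])
              (PySem.Int.mod (PySem.Int.mod ((j : Int) * (w : Int) + i + shift) ((w : Int) * (h : Int))) (w : Int))
              (PySem.List.pyGetD (PySem.List.pyGetD M (j : Int) []) i 0)))
        S ((List.range w).map Nat.cast)
      = List.foldl (fun S (i : Nat) => pvFlatBody flat w (w * h) shift S ((j * w + i : Nat) : Int)) S (List.range w) := by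
    intro S j hj
    rw [List.foldl_map]
    apply List.foldl_ext
    intro S' i hi
    rw [List.mem_range] at hi
    simp only [pvFlatBody]
    rw [← hget j i hj hi]
    have h1 : ((j * w + i : Nat) : Int) + shift = (j : Int) * (w : Int) + (i : Int) + shift := by
      push_cast; ring
    have h2 : (((w * h : Nat)) : Int) = (w : Int) * (h : Int) := by push_cast; ring
    rw [h1, h2]
  rw [List.foldl_ext _ (fun S (j : Nat) =>
        List.foldl (fun S (i : Nat) => pvFlatBody flat w (w * h) shift S ((j * w + i : Nat) : Int)) S
          (List.range w)) _
      (by intro S j hj; rw [List.mem_range] at hj; exact hinner S j hj)]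
  rw [pv_nest (fun S d => pvFlatBody flat w (w * h) shift S (d : Int)) w h
    (List.replicate h (List.replicate w (0 : Int))), Nat.mul_comm h w]
  rfl


theorem pv_main (r0 : List Int) (rs : List (List Int)) (shift : Int)
    (hr : ∀ row ∈ r0 :: rs, r0.length ≤ row.length) :
    shift_matrix (r0 :: rs) shift = shift_matrix_alt (r0 :: rs) shift := by
  simp only [shift_matrix, shift_matrix_alt, PySem.List.pyGet?_zero_cons, Option.getD_some]
  by_cases hw0 : r0.length = 0
  · -- zero-width rows: both sides are h empty rows
    rw [hw0]
    simp only [Nat.cast_zero, PySem.List.pyRange_one_eq_nil (le_refl (0 : Int)), List.map_nil,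
      List.foldl_nil, List.foldl_fixed, zero_mul,
      PySem.List.pyRange_one_eq_nil (le_refl (0 : Int))]
    exact List.map_congr_left (fun a _ => by simp [PySem.List.slice])
  · have hw : 0 < r0.length := Nat.pos_of_ne_zero hw0
    set w : Nat := r0.length with hwdef
    set h : Nat := (r0 :: rs).length with hhdef
    have hh0 : 0 < h := by simp [hhdef]
    set flat : List Int :=
      (r0 :: rs).flatMap (fun row => PySem.List.slice row none (some (w : Int))) with hflatdef
    have hget : ∀ j i : Nat, j < h → i < w →
        PySem.List.pyGetD (PySem.List.pyGetD (r0 :: rs) (j : Int) []) (i : Int) 0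
          = PySem.List.pyGetD flat ((j * w + i : Nat) : Int) 0 := by
      intro j i hj hi
      exact pv_flat_get w (r0 :: rs) hr j i hj hi
    rw [pv_portA_eq (r0 :: rs) w h shift flat hw hget]
    -- B side: turn ranges into List.range and slices into drop/take
    rw [show ((w : Int) * (h : Int)) = ((w * h : Nat) : Int) by push_cast; ring]
    rw [PySem.List.pyRange_zero_natCast (w * h), PySem.List.pyRange_zero_natCast h,
      List.map_map, List.map_map]
    obtain ⟨hlen, hrows, hcell⟩ := pv_scatter w h hw hh0 shift flat (w * h) le_rfl
    set out : List Int := (List.range (w * h)).map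
      ((fun m => PySem.List.pyGetD flat (PySem.Int.mod (m - shift) ((w * h : Nat) : Int)) 0) ∘
        (fun k : Nat => (k : Int))) with houtdef
    have houtlen : out.length = w * h := by simp [houtdef]
    have houtget : ∀ m : Nat, (hm : m < w * h) →
        out[m]'(by omega) = PySem.List.pyGetD flat (PySem.Int.mod ((m : Int) - shift) ((w * h : Nat) : Int)) 0 := by
      intro m hm
      simp only [houtdef, List.getElem_map, List.getElem_range, Function.comp_apply]
    have hrowB : ∀ j : Nat,
        PySem.List.slice out (some ((j : Int) * (w : Int))) (some (((j : Int) + 1) * (w : Int)))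
          = (out.drop (j * w)).take w := by
      intro j
      rw [show ((j : Int) * (w : Int)) = ((j * w : Nat) : Int) by push_cast; ring,
        show (((j : Int) + 1) * (w : Int)) = ((j * w : Nat) : Int) + ((w : Nat) : Int) by push_cast; ring]
      exact PySem.List.slice_natCast_add out (j * w) w
    apply List.ext_getElem
    · rw [hlen]
      simp
    · intro j hjA hjB
      have hj : j < h := by rwa [hlen] at hjA
      have hjw : j * w + w ≤ w * h := by
        have h1 := Nat.mul_le_mul_right w (Nat.succ_le_of_lt hj)
        rw [Nat.succ_mul, Nat.mul_comm h w] at h1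
        omega
      rw [List.getElem_map, List.getElem_range]
      rw [Function.comp_apply, hrowB j]
      have hrowlenA : (pvScat flat w h shift (w * h))[j].length = w := by
        rw [← List.getD_eq_getElem _ [] hjA]
        exact hrows j hj
      apply List.ext_getElem
      · rw [hrowlenA]
        simp [houtlen]
        omega
      · intro i hiA hiB
        have hi : i < w := by rwa [hrowlenA] at hiA
        have htn : j * w + i < w * h := by omega
        have hdiv : (j * w + i) / w = j := by
          rw [Nat.mul_comm j w, Nat.mul_add_div hw, Nat.div_eq_of_lt hi, Nat.add_zero]
        have hmod : (j * w + i) % w = i := by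
          rw [Nat.mul_comm j w, Nat.mul_add_mod, Nat.mod_eq_of_lt hi]
        -- A entry = cell value
        have hA : (pvScat flat w h shift (w * h))[j][i]
            = pvCell (pvScat flat w h shift (w * h)) w (j * w + i) := by
          unfold pvCell
          rw [hdiv, hmod, List.getD_eq_getElem _ [] hjA, List.getD_eq_getElem _ 0 (by rw [hrowlenA]; exact hi)]
        rw [hA, hcell _ htn]
        have he0 : 0 ≤ ((j * w + i : Nat) : Int) - shift
            ∨ True := Or.inr trivial
        have hn' : (0 : Int) < ((w * h : Nat) : Int) := by exact_mod_cast Nat.mul_pos hw hh0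
        rw [if_pos (by
          have := Int.emod_lt_of_pos (((j * w + i : Nat) : Int) - shift) hn'
          omega)]
        -- B entry
        rw [List.getElem_take, List.getElem_drop]
        rw [houtget (j * w + i) htn]

-- ===== VERDICT (by name: the statement is the Claim_ definition above) =====
theorem shift_matrix_spec : Claim_equal_shift_matrix := by
  intro M_input shift _hdom hpre
  unfold Spec_shift_matrix
  obtain ⟨hne, hrect⟩ := hpre
  cases M_input with
  | nil => exact absurd rfl hne
  | cons r0 rs => exact pv_main r0 rs shift (by simpa using hrect)
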